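-- pv_equiv track=rewrite | github.com/srajsonu/100DaysOfCode | Searching/Searching I/7. Maximum height of staircase.py | solve
-- ===== SOURCE A (Python) =====
-- def solve(A):
--     l = 1
--     h = A
--     while l <= h:
--         mid = (l + h) // 2
--         sm = (mid * (mid+1)) // 2
--         if sm <= A:
--             l = mid + 1
--         else:
--             h = mid - 1
--
--     return l - 1
-- ===== SOURCE B (Python) =====
-- def _isqrt(n):
--     # Newton's method integer square root (floor(sqrt(n))) for n >= 0.
--     if n == 0:
--         return 0
--     x = n
--     y = (x + n // x) // 2
--     while y < x:
--         x = y
--         y = (x + n // x) // 2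
--     return x
--
--
-- def solve(A):
--     if A <= 0:
--         return 0
--     return (_isqrt(8 * A + 1) - 1) // 2
-- ===== Notes on version B (the rewrite author's own statement) =====
-- stated objective: alternative
-- what changed: Replaces the binary search over the staircase heights testing triangular sums with the closed form via an integer square root computed by Newton's iteration.
import Mathlib
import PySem

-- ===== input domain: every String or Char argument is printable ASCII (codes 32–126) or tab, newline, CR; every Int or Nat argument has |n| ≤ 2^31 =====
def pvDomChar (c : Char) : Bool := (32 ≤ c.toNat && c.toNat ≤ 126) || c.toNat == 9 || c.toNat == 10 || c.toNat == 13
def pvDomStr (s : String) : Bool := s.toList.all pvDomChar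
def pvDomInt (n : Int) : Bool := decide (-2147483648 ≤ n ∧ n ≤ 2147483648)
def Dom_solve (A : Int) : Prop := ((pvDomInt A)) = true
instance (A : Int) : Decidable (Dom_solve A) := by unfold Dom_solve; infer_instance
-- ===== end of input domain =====

-- B replaces A's binary search over [1, A] by the closed form (isqrt(8A+1)-1)//2,
-- with the integer square root computed by Newton's iteration.

-- ===== PORT A =====
-- the while loop of A: state (l, h); returns the final l
def solveLoop (A l h : Int) : Int :=
  if _hlh : l ≤ h then
    let mid := PySem.Int.floordiv (l + h) 2
    let sm := PySem.Int.floordiv (mid * (mid + 1)) 2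
    if sm ≤ A then solveLoop A (mid + 1) h else solveLoop A l (mid - 1)
  else l
termination_by (h + 1 - l).toNat
decreasing_by
  · have h2 := PySem.Int.floordiv_two_mid_bounds _hlh
    omega
  · have h2 := PySem.Int.floordiv_two_mid_bounds _hlh
    omega

def solve (A : Int) : Int := solveLoop A 1 A - 1

-- ===== PORT B =====
-- Newton's iteration for _isqrt: state (x); all values are nonnegative in Source B,
-- so Nat `/` coincides with Python `//` here (exact on the admitted inputs)
def newtonLoop (n x : Nat) : Nat :=
  let y := (x + n / x) / 2
  if _h : y < x then newtonLoop n y else x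
termination_by x

-- _isqrt of Source B
def isqrtN (n : Nat) : Nat := if n = 0 then 0 else newtonLoop n n

def solve_alt (A : Int) : Int :=
  if A ≤ 0 then 0
  else (((isqrtN ((8 * A + 1).toNat) - 1) / 2 : Nat) : Int)

-- ===== PRECONDITION & SPEC =====
def Spec_solve (A : Int) (out : Int) : Prop := out = solve_alt A
instance (A : Int) (out : Int) : Decidable (Spec_solve A out) := by unfold Spec_solve; infer_instance

-- ===== CLAIM (what is proved, stated in full; the proofs are below) =====
def Claim_equal_solve : Prop := ∀ (A : Int), Dom_solve A → Spec_solve A (solve A)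

-- ===== LEMMAS AND PROOFS =====

-- Newton's iteration computes the integer square root
theorem newtonLoop_eq_sqrt (n : Nat) : ∀ x, 0 < n → Nat.sqrt n ≤ x → newtonLoop n x = Nat.sqrt n := by
  intro x
  induction x using Nat.strong_induction_on with
  | _ x ih =>
    intro hn hsx
    have hs1 : 1 ≤ Nat.sqrt n := Nat.sqrt_pos.mpr hn
    have hx : 0 < x := lt_of_lt_of_le hs1 hsx
    rw [newtonLoop]
    split
    case isTrue hlt =>
      -- y = (x + n/x)/2 < x; show sqrt n ≤ y, recurse
      have hkey : Nat.sqrt n ≤ (x + n / x) / 2 := by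
        set s := Nat.sqrt n with hsdef
        set q := n / x with hq
        by_contra hcon
        push_neg at hcon
        have hdm : x * q + n % x = n := Nat.div_add_mod n x
        have hr : n % x < x := Nat.mod_lt _ hx
        have hss : s * s ≤ n := by simpa [pow_two] using Nat.sqrt_le' n
        have h2 : x + q + 1 ≤ 2 * s := by omega
        zify at hdm hr hss h2
        nlinarith [sq_nonneg ((s : Int) - (x : Int)),
          mul_le_mul_of_nonneg_left (by omega : (q : Int) ≤ 2 * s - 1 - x)
            (by positivity : (0 : Int) ≤ (x : Int))]
      exact ih _ hlt hn hkey
    case isFalse hge =>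
      -- exit: sqrt n ≤ x and x ≤ sqrt n
      by_contra hne
      have hlt : Nat.sqrt n < x := lt_of_le_of_ne hsx (fun h => hne h.symm)
      have hnx : n < x * x := by simpa [pow_two] using Nat.sqrt_lt'.mp hlt
      have hq : n / x < x := (Nat.div_lt_iff_lt_mul hx).mpr hnx
      omega

theorem isqrtN_eq (n : Nat) : isqrtN n = Nat.sqrt n := by
  unfold isqrtN
  split
  case isTrue h => simp [h]
  case isFalse h =>
    exact newtonLoop_eq_sqrt n n (by omega) (Nat.sqrt_le_self n)

-- uniqueness of the staircase height: m(m+1) ≤ 2A < (m+1)(m+2) pins m down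
theorem tri_uniq (A m n : Int) (hm0 : 0 ≤ m) (hn0 : 0 ≤ n)
    (hm1 : m * (m + 1) ≤ 2 * A) (hm2 : 2 * A < (m + 1) * (m + 2))
    (hn1 : n * (n + 1) ≤ 2 * A) (hn2 : 2 * A < (n + 1) * (n + 2)) : m = n := by
  rcases lt_trichotomy m n with h | h | h
  · nlinarith
  · exact h
  · nlinarith

-- unfolding equations for the loop
theorem solveLoop_step (A l h : Int) (hle : l ≤ h) :
    solveLoop A l h =
      (if PySem.Int.floordiv ((PySem.Int.floordiv (l + h) 2) * ((PySem.Int.floordiv (l + h) 2) + 1)) 2 ≤ A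
        then solveLoop A ((PySem.Int.floordiv (l + h) 2) + 1) h
        else solveLoop A l ((PySem.Int.floordiv (l + h) 2) - 1)) := by
  rw [solveLoop, dif_pos hle]

theorem solveLoop_base (A l h : Int) (hle : ¬ l ≤ h) : solveLoop A l h = l := by
  rw [solveLoop, dif_neg hle]

-- invariant of A's binary search
theorem solveLoop_correct (A l h : Int) : 1 ≤ l → l ≤ h + 1 →
    (l - 1) * l ≤ 2 * A → 2 * A < (h + 1) * (h + 2) →
    (solveLoop A l h - 1) * solveLoop A l h ≤ 2 * A ∧
      2 * A < solveLoop A l h * (solveLoop A l h + 1) ∧ 1 ≤ solveLoop A l h := by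
  induction l, h using solveLoop.induct (A := A) with
  | case1 l h hle mid sm hsm ih =>
    have hmid : mid = PySem.Int.floordiv (l + h) 2 := rfl
    have hsmv : sm = PySem.Int.floordiv (mid * (mid + 1)) 2 := rfl
    intro hl hlh h1 h2
    have hmb := PySem.Int.floordiv_two_mid_bounds hle
    rw [← hmid] at hmb
    -- sm ≤ A gives mid*(mid+1) ≤ 2A (mid*(mid+1) is even)
    have htri : mid * (mid + 1) ≤ 2 * A := by
      obtain ⟨k, hk⟩ : ∃ k : Int, mid * (mid + 1) = k + k := Int.even_mul_succ_self mid
      have hsm' : sm ≤ A := hsm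
      rw [hsmv, hk, show k + k = k * 2 by ring,
        PySem.Int.floordiv_eq_ediv_of_pos (by omega), Int.mul_ediv_cancel _ (by omega)] at hsm'
      omega
    rw [solveLoop_step A l h hle, ← hmid, ← hsmv, if_pos hsm]
    exact ih (by omega) (by omega)
      (by have : (mid + 1 - 1) * (mid + 1) = mid * (mid + 1) := by ring
          omega) h2
  | case2 l h hle mid sm hsm ih =>
    have hmid : mid = PySem.Int.floordiv (l + h) 2 := rfl
    have hsmv : sm = PySem.Int.floordiv (mid * (mid + 1)) 2 := rfl
    intro hl hlh h1 h2
    have hmb := PySem.Int.floordiv_two_mid_bounds hle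
    rw [← hmid] at hmb
    have htri : 2 * A < mid * (mid + 1) := by
      have hsm' : ¬ sm ≤ A := hsm
      rw [hsmv] at hsm'
      have hge : A + 1 ≤ PySem.Int.floordiv (mid * (mid + 1)) 2 := by omega
      have := (PySem.Int.le_floordiv_iff_mul_le (a := mid * (mid + 1)) (b := 2) (q := A + 1) (by omega)).mp hge
      omega
    rw [solveLoop_step A l h hle, ← hmid, ← hsmv, if_neg hsm]
    exact ih (by omega) (by omega) h1
      (by have : (mid - 1 + 1) * (mid - 1 + 2) = mid * (mid + 1) := by ring
          omega)
  | case3 l h hle =>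
    intro hl hlh h1 h2
    rw [solveLoop_base A l h hle]
    have hl' : l = h + 1 := by omega
    subst hl'
    refine ⟨by nlinarith, by nlinarith, by omega⟩

-- characterization of B's closed form
theorem solve_alt_correct (A : Int) (hA : 1 ≤ A) :
    0 ≤ solve_alt A ∧ solve_alt A * (solve_alt A + 1) ≤ 2 * A ∧
      2 * A < (solve_alt A + 1) * (solve_alt A + 2) := by
  unfold solve_alt
  rw [if_neg (by omega)]
  set m : Nat := (8 * A + 1).toNat with hm
  have hmI : (m : Int) = 8 * A + 1 := by omega
  rw [isqrtN_eq]
  set s : Nat := Nat.sqrt m with hs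
  have hss : (s : Int) * s ≤ 8 * A + 1 := by
    have h0 : s * s ≤ m := by simpa [pow_two] using Nat.sqrt_le' m
    zify at h0; omega
  have hlt : 8 * A + 1 < ((s : Int) + 1) * ((s : Int) + 1) := by
    have h0 : m < (s + 1) * (s + 1) := by
      simpa [pow_two, Nat.succ_eq_add_one] using Nat.lt_succ_sqrt' m
    zify at h0; omega
  have hs1 : 1 ≤ s := Nat.sqrt_pos.mpr (by omega)
  set nB : Nat := (s - 1) / 2 with hn
  have hb : 2 * nB ≤ s - 1 ∧ s - 1 ≤ 2 * nB + 1 := by omega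
  have hbI : 2 * (nB : Int) + 1 ≤ s ∧ (s : Int) ≤ 2 * nB + 2 := by omega
  refine ⟨by positivity, ?_, ?_⟩
  · nlinarith [hbI.1, hss, sq_nonneg ((s : Int) - 2 * nB - 1)]
  · nlinarith [hbI.2, hlt]

-- ===== VERDICT (by name: the statement is the Claim_ definition above) =====
theorem solve_spec : Claim_equal_solve := by
  intro A _
  unfold Spec_solve solve
  by_cases hA : A ≤ 0
  · rw [solveLoop_base A 1 A (by omega)]
    unfold solve_alt
    rw [if_pos hA]
    norm_num
  · push_neg at hA
    obtain ⟨h1, h2, h3⟩ := solveLoop_correct A 1 A (by omega) (by omega) (by omega) (by nlinarith)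
    obtain ⟨g0, g1, g2⟩ := solve_alt_correct A (by omega)
    have := tri_uniq A (solveLoop A 1 A - 1) (solve_alt A) (by omega) g0
      (by have : (solveLoop A 1 A - 1) * (solveLoop A 1 A - 1 + 1) = (solveLoop A 1 A - 1) * solveLoop A 1 A := by ring
          omega)
      (by have : (solveLoop A 1 A - 1 + 1) * (solveLoop A 1 A - 1 + 2) = solveLoop A 1 A * (solveLoop A 1 A + 1) := by ring
          omega) g1 g2
    omega
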